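-- pv_equiv track=rewrite | github.com/jijingdeyi/cv-rookie | plots/compare_viewer.py | build_zoom_positions
-- ===== SOURCE A (Python) =====
-- def build_zoom_positions(base_pos: str, n: int):
--     if n <= 0:
--         return []
--     orders = {
--         "tl": ["tl", "tr", "bl", "br"],
--         "tr": ["tr", "tl", "br", "bl"],
--         "bl": ["bl", "br", "tl", "tr"],
--         "br": ["br", "bl", "tr", "tl"],
--     }
--     seq = orders.get(base_pos, ["br", "bl", "tr", "tl"])
--     return [seq[i % len(seq)] for i in range(n)]
-- ===== SOURCE B (Python) =====
-- def build_zoom_positions(base_pos: str, n: int):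
--     if n <= 0:
--         return []
--     top = base_pos in ("tl", "tr")
--     left = base_pos in ("tl", "bl")
--     out = []
--     for i in range(n):
--         t = top ^ ((i // 2) % 2 == 1)
--         l = left ^ (i % 2 == 1)
--         out.append(("t" if t else "b") + ("l" if l else "r"))
--     return out
-- ===== Notes on version B (the rewrite author's own statement) =====
-- stated objective: alternative
-- what changed: B drops the orders dict and the stored 4-element sequences entirely: it decodes base_pos into two booleans (top, left) and synthesizes each corner name directly from the bit pattern of the index (XOR with i%2 and (i//2)%2), appending in an explicit accumulator loop.
import Mathlib
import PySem

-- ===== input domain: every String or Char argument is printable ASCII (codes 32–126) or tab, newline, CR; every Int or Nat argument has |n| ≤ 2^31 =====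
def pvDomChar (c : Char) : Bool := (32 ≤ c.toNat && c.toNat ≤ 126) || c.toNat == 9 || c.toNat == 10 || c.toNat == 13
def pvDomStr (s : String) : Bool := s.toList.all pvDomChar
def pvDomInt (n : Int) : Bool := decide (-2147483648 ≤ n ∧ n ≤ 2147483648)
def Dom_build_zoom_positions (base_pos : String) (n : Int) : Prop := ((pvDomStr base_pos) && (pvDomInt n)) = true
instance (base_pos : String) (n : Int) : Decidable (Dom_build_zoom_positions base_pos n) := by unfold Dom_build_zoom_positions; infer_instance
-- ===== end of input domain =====

-- B has no dict and no stored sequences: it decodes base_pos into two booleans and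
-- synthesizes each corner from the bit pattern of the index; objective: alternative, same cost.

-- ===== PORT A =====
def build_zoom_positions (base_pos : String) (n : Int) : List String :=
  if n ≤ 0 then []
  else
    let orders : PySem.Dict String (List String) :=
      PySem.Dict.ofList [("tl", ["tl","tr","bl","br"]), ("tr", ["tr","tl","br","bl"]),
                         ("bl", ["bl","br","tl","tr"]), ("br", ["br","bl","tr","tl"])]
    let seq := orders.getD base_pos ["br","bl","tr","tl"]
    (PySem.List.pyRange 0 n 1).map (fun i => PySem.List.pyGetD seq (PySem.Int.mod i (seq.length : Int)) "")

-- ===== PORT B =====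
def build_zoom_positions_alt (base_pos : String) (n : Int) : List String :=
  if n ≤ 0 then []
  else
    let top : Bool := base_pos == "tl" || base_pos == "tr"
    let left : Bool := base_pos == "tl" || base_pos == "bl"
    (PySem.List.pyRange 0 n 1).foldl (fun out i =>
      let t := xor top (PySem.Int.mod (PySem.Int.floordiv i 2) 2 == 1)
      let l := xor left (PySem.Int.mod i 2 == 1)
      out ++ [(if t then "t" else "b") ++ (if l then "l" else "r")]) []

-- ===== PRECONDITION & SPEC =====
def Spec_build_zoom_positions (base_pos : String) (n : Int) (out : List String) : Prop := out = build_zoom_positions_alt base_pos n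
instance (base_pos : String) (n : Int) (out : List String) : Decidable (Spec_build_zoom_positions base_pos n out) := by unfold Spec_build_zoom_positions; infer_instance

-- ===== CLAIM (what is proved, stated in full; the proofs are below) =====
def Claim_equal_build_zoom_positions : Prop := ∀ (base_pos : String) (n : Int), Dom_build_zoom_positions base_pos n → Spec_build_zoom_positions base_pos n (build_zoom_positions base_pos n)

-- ===== LEMMAS AND PROOFS =====

-- an append-accumulator foldl is the map of its element function
theorem pv_foldl_append_map {α β : Type} (xs : List α) (f : α → β) (acc : List β) :
    xs.foldl (fun out i => out ++ [f i]) acc = acc ++ xs.map f := by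
  induction xs generalizing acc with
  | nil => simp
  | cons x xs ih => simp [List.foldl_cons, ih]

-- B's per-index corner formula, as a function of a Nat index
def pvCorner (top left : Bool) (k : Nat) : String :=
  (if xor top (k / 2 % 2 == 1) then "t" else "b") ++ (if xor left (k % 2 == 1) then "l" else "r")

-- B's Int-index body equals pvCorner on Nat casts
theorem pv_body_natCast (top left : Bool) (k : Nat) :
    (let t := xor top (PySem.Int.mod (PySem.Int.floordiv ((k : Nat) : Int) 2) 2 == 1)
     let l := xor left (PySem.Int.mod ((k : Nat) : Int) 2 == 1)
     (if t then "t" else "b") ++ (if l then "l" else "r")) = pvCorner top left k := by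
  have h1 : PySem.Int.floordiv ((k : Nat) : Int) 2 = ((k / 2 : Nat) : Int) :=
    PySem.Int.floordiv_natCast k 2
  have h2 : PySem.Int.mod ((k / 2 : Nat) : Int) 2 = ((k / 2 % 2 : Nat) : Int) :=
    PySem.Int.mod_natCast (k / 2) 2
  have h3 : PySem.Int.mod ((k : Nat) : Int) 2 = ((k % 2 : Nat) : Int) :=
    PySem.Int.mod_natCast k 2
  have hb1 : ((((k / 2 % 2 : Nat)) : Int) == 1) = (k / 2 % 2 == 1) := by
    by_cases h : k / 2 % 2 = 1
    · simp [h]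
    · have h0 : k / 2 % 2 = 0 := by omega
      simp [h0]
  have hb2 : ((((k % 2 : Nat)) : Int) == 1) = (k % 2 == 1) := by
    by_cases h : k % 2 = 1
    · simp [h]
    · have h0 : k % 2 = 0 := by omega
      simp [h0]
  simp only [h1, h2, h3, hb1, hb2, pvCorner]

-- A's per-index value equals pvCorner, for each of the five seq/flag configurations
theorem pv_cell (seq : List String) (top left : Bool) (k : Nat)
    (h0 : seq.getD 0 "" = pvCorner top left 0) (h1 : seq.getD 1 "" = pvCorner top left 1)
    (h2 : seq.getD 2 "" = pvCorner top left 2) (h3 : seq.getD 3 "" = pvCorner top left 3) :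
    seq.getD (k % 4) "" = pvCorner top left k := by
  have hm : k % 4 = 0 ∨ k % 4 = 1 ∨ k % 4 = 2 ∨ k % 4 = 3 := by omega
  have hb : k / 2 % 2 = (k % 4) / 2 ∧ k % 2 = (k % 4) % 2 := by omega
  rcases hm with h | h | h | h <;>
    · rw [h]
      simp only [pvCorner] at *
      rw [hb.1, hb.2, h]
      first | exact h0 | exact h1 | exact h2 | exact h3

-- ===== VERDICT (by name: the statement is the Claim_ definition above) =====
theorem build_zoom_positions_spec : Claim_equal_build_zoom_positions := by
  intro base_pos n _
  unfold Spec_build_zoom_positions build_zoom_positions build_zoom_positions_alt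
  by_cases hn : n ≤ 0
  · simp [hn]
  · simp only [if_neg hn]
    rw [pv_foldl_append_map, List.nil_append, PySem.List.pyRange_one]
    simp only [sub_zero, List.map_map]
    apply List.map_congr_left
    intro k _
    simp only [Function.comp, zero_add]
    rw [pv_body_natCast]
    by_cases e1 : base_pos = "tl"
    · subst e1
      rw [show (PySem.Dict.ofList [("tl", (["tl","tr","bl","br"] : List String)), ("tr", ["tr","tl","br","bl"]),
            ("bl", ["bl","br","tl","tr"]), ("br", ["br","bl","tr","tl"])]).getD "tl" ["br","bl","tr","tl"]
          = ["tl","tr","bl","br"] from by decide]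
      have hmod : PySem.Int.mod ((k : Nat) : Int) 4 = ((k % 4 : Nat) : Int) := by
        exact_mod_cast PySem.Int.mod_natCast k 4
      rw [show (((["tl","tr","bl","br"] : List String).length : Nat) : Int) = (4 : Int) from rfl,
        hmod, PySem.List.pyGetD_natCast]
      exact pv_cell _ true true k (by decide) (by decide) (by decide) (by decide)
    · by_cases e2 : base_pos = "tr"
      · subst e2
        rw [show (PySem.Dict.ofList [("tl", (["tl","tr","bl","br"] : List String)), ("tr", ["tr","tl","br","bl"]),
              ("bl", ["bl","br","tl","tr"]), ("br", ["br","bl","tr","tl"])]).getD "tr" ["br","bl","tr","tl"]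
            = ["tr","tl","br","bl"] from by decide]
        have hmod : PySem.Int.mod ((k : Nat) : Int) 4 = ((k % 4 : Nat) : Int) := by
          exact_mod_cast PySem.Int.mod_natCast k 4
        rw [show (((["tr","tl","br","bl"] : List String).length : Nat) : Int) = (4 : Int) from rfl,
          hmod, PySem.List.pyGetD_natCast]
        exact pv_cell _ true false k (by decide) (by decide) (by decide) (by decide)
      · by_cases e3 : base_pos = "bl"
        · subst e3
          rw [show (PySem.Dict.ofList [("tl", (["tl","tr","bl","br"] : List String)), ("tr", ["tr","tl","br","bl"]),
                ("bl", ["bl","br","tl","tr"]), ("br", ["br","bl","tr","tl"])]).getD "bl" ["br","bl","tr","tl"]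
              = ["bl","br","tl","tr"] from by decide]
          have hmod : PySem.Int.mod ((k : Nat) : Int) 4 = ((k % 4 : Nat) : Int) := by
            exact_mod_cast PySem.Int.mod_natCast k 4
          rw [show (((["bl","br","tl","tr"] : List String).length : Nat) : Int) = (4 : Int) from rfl,
            hmod, PySem.List.pyGetD_natCast]
          exact pv_cell _ false true k (by decide) (by decide) (by decide) (by decide)
        · have hget : (PySem.Dict.ofList [("tl", (["tl","tr","bl","br"] : List String)), ("tr", ["tr","tl","br","bl"]),
              ("bl", ["bl","br","tl","tr"]), ("br", ["br","bl","tr","tl"])]).getD base_pos ["br","bl","tr","tl"]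
              = ["br","bl","tr","tl"] := by
            have hmk : (PySem.Dict.ofList [("tl", (["tl","tr","bl","br"] : List String)), ("tr", ["tr","tl","br","bl"]),
                ("bl", ["bl","br","tl","tr"]), ("br", ["br","bl","tr","tl"])]) = PySem.Dict.mk
                [("tl", ["tl","tr","bl","br"]), ("tr", ["tr","tl","br","bl"]),
                 ("bl", ["bl","br","tl","tr"]), ("br", ["br","bl","tr","tl"])] := by decide
            rw [hmk]
            simp only [PySem.Dict.getD, PySem.Dict.get?_mk_cons]
            split_ifs with a b c d
            · exact absurd (beq_iff_eq.mp a).symm e1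
            · exact absurd (beq_iff_eq.mp b).symm e2
            · exact absurd (beq_iff_eq.mp c).symm e3
            · rfl
            · simp [PySem.Dict.get?]
          rw [hget]
          have hmod : PySem.Int.mod ((k : Nat) : Int) 4 = ((k % 4 : Nat) : Int) := by
            exact_mod_cast PySem.Int.mod_natCast k 4
          rw [show (((["br","bl","tr","tl"] : List String).length : Nat) : Int) = (4 : Int) from rfl,
            hmod, PySem.List.pyGetD_natCast]
          have htop : (base_pos == "tl" || base_pos == "tr") = false := by
            simp [e1, e2]
          have hleft : (base_pos == "tl" || base_pos == "bl") = false := by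
            simp [e1, e3]
          rw [htop, hleft]
          exact pv_cell _ false false k (by decide) (by decide) (by decide) (by decide)
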